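-- pv_equiv track=rewrite | github.com/yiyan023/Data-Structures | Formation/Edge List.py | sumNodes
-- ===== SOURCE A (Python) =====
-- from collections import defaultdict, deque
--
-- def sumNodes(vertexList: list, edgeList: list, startNode: int) -> int:
--     neighbours = defaultdict(list)
--     res = 0
--
--     for s, e in edgeList:
--         neighbours[s].append(e)
--         neighbours[e].append(s)
--
--     if startNode not in set(vertexList):
--         return 0
--
--     seen = set()
--     seen.add(startNode)
--
--     queue = deque()
--     queue.append(startNode)
--
--
--     while queue:
--         node = queue.popleft()
--         res += node
--
--         for neighbour in neighbours[node]: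
--             if neighbour not in seen:
--                 seen.add(neighbour)
--                 queue.append(neighbour)
--
--     return res
-- ===== SOURCE B (Python) =====
-- def sumNodes(vertexList: list, edgeList: list, startNode: int) -> int:
--     if startNode not in vertexList:
--         return 0
--     reach = {startNode}
--     changed = True
--     while changed:
--         changed = False
--         for s, e in edgeList:
--             if s in reach and e not in reach:
--                 reach.add(e)
--                 changed = True
--             elif e in reach and s not in reach:
--                 reach.add(s)
--                 changed = True
--     return sum(reach)
-- ===== Notes on version B (the rewrite author's own statement) =====
-- stated objective: alternative
-- what changed: Replaces BFS (adjacency dict + deque frontier + seen set + running sum) by fixed-point label propagation: repeatedly sweep the raw edge list, absorbing any edge endpoint adjacent to the reached set, until a sweep changes nothing, then sum the reached set.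
import Mathlib
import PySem

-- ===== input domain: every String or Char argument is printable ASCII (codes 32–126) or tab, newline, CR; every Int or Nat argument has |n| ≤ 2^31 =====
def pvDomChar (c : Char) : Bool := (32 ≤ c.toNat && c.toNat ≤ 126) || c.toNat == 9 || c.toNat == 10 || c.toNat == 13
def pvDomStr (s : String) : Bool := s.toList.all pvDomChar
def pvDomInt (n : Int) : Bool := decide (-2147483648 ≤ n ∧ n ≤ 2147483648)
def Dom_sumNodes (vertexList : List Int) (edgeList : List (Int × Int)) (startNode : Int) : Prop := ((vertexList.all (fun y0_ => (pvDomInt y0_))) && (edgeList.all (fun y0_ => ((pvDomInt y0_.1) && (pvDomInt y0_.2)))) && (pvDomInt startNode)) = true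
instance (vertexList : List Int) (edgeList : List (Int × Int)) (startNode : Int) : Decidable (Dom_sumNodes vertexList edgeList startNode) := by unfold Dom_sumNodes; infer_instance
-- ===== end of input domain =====

-- B replaces BFS by fixed-point label propagation over the raw edge list (alternative algorithm, not claimed faster).

-- ===== PORT A =====
-- neighbours = defaultdict(list); for s, e in edgeList: neighbours[s].append(e); neighbours[e].append(s)
def pvBuildNbrs (edgeList : List (Int × Int)) : PySem.Dict Int (List Int) :=
  edgeList.foldl
    (fun d p => (d.modify p.1 [] (· ++ [p.2])).modify p.2 [] (· ++ [p.1]))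
    PySem.Dict.empty

-- the BFS while-loop; state (seen, queue, res); fuel only makes the recursion total
-- (4*|edges|+2 exceeds the number of pops, which is at most the number of distinct nodes)
def pvBfsLoop (nb : PySem.Dict Int (List Int)) :
    Nat → PySem.Set Int → List Int → Int → Int × PySem.Set Int
  | _, seen, [], res => (res, seen)
  | 0, seen, _, res => (res, seen)
  | fuel+1, seen, node :: queue, res =>
      let sq := (nb.getD node []).foldl
        (fun (sq : PySem.Set Int × List Int) n =>
          if PySem.Set.contains sq.1 n then sq
          else (PySem.Set.add sq.1 n, sq.2 ++ [n])) (seen, queue)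
      pvBfsLoop nb fuel sq.1 sq.2 (res + node)

def sumNodes (vertexList : List Int) (edgeList : List (Int × Int)) (startNode : Int) : Int :=
  let neighbours := pvBuildNbrs edgeList
  if (PySem.Set.ofList vertexList).contains startNode then
    (pvBfsLoop neighbours (4 * edgeList.length + 2)
      (PySem.Set.add PySem.Set.empty startNode) [startNode] 0).1
  else 0

-- ===== PORT B =====
-- one sweep over the edge list: absorb endpoints adjacent to the reached set; Bool = changed
def pvPass (edgeList : List (Int × Int)) (reach : PySem.Set Int) : PySem.Set Int × Bool :=
  edgeList.foldl
    (fun (st : PySem.Set Int × Bool) p =>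
      if PySem.Set.contains st.1 p.1 && !PySem.Set.contains st.1 p.2 then
        (PySem.Set.add st.1 p.2, true)
      else if PySem.Set.contains st.1 p.2 && !PySem.Set.contains st.1 p.1 then
        (PySem.Set.add st.1 p.1, true)
      else st)
    (reach, false)

-- while changed: sweep; fuel only makes the loop total (2*|edges|+2 exceeds the number of sweeps)
def pvSatLoop (edgeList : List (Int × Int)) : Nat → PySem.Set Int → PySem.Set Int
  | 0, reach => reach
  | fuel+1, reach =>
      let rc := pvPass edgeList reach
      if rc.2 then pvSatLoop edgeList fuel rc.1 else rc.1

def sumNodes_alt (vertexList : List Int) (edgeList : List (Int × Int)) (startNode : Int) : Int :=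
  if vertexList.contains startNode then
    (pvSatLoop edgeList (2 * edgeList.length + 2)
      (PySem.Set.add PySem.Set.empty startNode)).sum
  else 0

-- ===== PRECONDITION & SPEC =====
def Spec_sumNodes (vertexList : List Int) (edgeList : List (Int × Int)) (startNode : Int) (out : Int) : Prop := out = sumNodes_alt vertexList edgeList startNode
instance (vertexList : List Int) (edgeList : List (Int × Int)) (startNode : Int) (out : Int) : Decidable (Spec_sumNodes vertexList edgeList startNode out) := by unfold Spec_sumNodes; infer_instance

-- ===== CLAIM (what is proved, stated in full; the proofs are below) =====
def Claim_equal_sumNodes : Prop := ∀ (vertexList : List Int) (edgeList : List (Int × Int)) (startNode : Int), Dom_sumNodes vertexList edgeList startNode → Spec_sumNodes vertexList edgeList startNode (sumNodes vertexList edgeList startNode)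

-- ===== LEMMAS AND PROOFS =====

-- undirected adjacency of the edge list, reachability, and the (finite) node universe
def pvAdj (E : List (Int × Int)) (x y : Int) : Prop := (x, y) ∈ E ∨ (y, x) ∈ E
def pvReach (E : List (Int × Int)) (s x : Int) : Prop := Relation.ReflTransGen (pvAdj E) s x
def pvUniv (E : List (Int × Int)) (s : Int) : List Int := s :: E.flatMap (fun p => [p.1, p.2])

theorem pvUniv_length (E : List (Int × Int)) (s : Int) :
    (pvUniv E s).length = 1 + 2 * E.length := by
  induction E with
  | nil => rfl
  | cons p E ih => simp_all [pvUniv]; omega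

theorem pvAdj_endpoint {E : List (Int × Int)} {x y : Int} (h : pvAdj E x y) :
    y ∈ E.flatMap (fun p => [p.1, p.2]) := by
  rcases h with h | h
  · exact List.mem_flatMap.2 ⟨(x, y), h, by simp⟩
  · exact List.mem_flatMap.2 ⟨(y, x), h, by simp⟩

theorem pvReach_mem_univ {E : List (Int × Int)} {s x : Int} (h : pvReach E s x) :
    x ∈ pvUniv E s := by
  induction h with
  | refl => exact List.mem_cons_self
  | tail _ hadj ih => exact List.mem_cons_of_mem _ (pvAdj_endpoint hadj)

theorem pvLen_le {l U : List Int} (hnd : l.Nodup) (hsub : ∀ x ∈ l, x ∈ U) :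
    l.length ≤ U.length := by
  calc l.length = l.toFinset.card := (List.toFinset_card_of_nodup hnd).symm
    _ ≤ U.toFinset.card := Finset.card_le_card (fun a ha => by
        simp only [List.mem_toFinset] at *; exact hsub a ha)
    _ ≤ U.length := U.toFinset_card_le

-- A's neighbour dict holds exactly the adjacent nodes
theorem pvBuildNbrs_fold (x y : Int) :
    ∀ (E : List (Int × Int)) (d : PySem.Dict Int (List Int)),
      (y ∈ (E.foldl (fun d p => (d.modify p.1 [] (· ++ [p.2])).modify p.2 [] (· ++ [p.1])) d).getD x [])
        ↔ y ∈ d.getD x [] ∨ pvAdj E x y := by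
  intro E
  induction E with
  | nil => intro d; simp [pvAdj]
  | cons p E ih =>
    intro d
    obtain ⟨s, e⟩ := p
    rw [List.foldl_cons, ih]
    simp only [PySem.Dict.getD_modify, pvAdj, List.mem_cons, Prod.mk.injEq]
    by_cases hse : s = e <;> by_cases hxe : x = e <;> by_cases hxs : x = s <;>
      simp_all [List.mem_append, eq_comm] <;> tauto

theorem pvBuildNbrs_mem (E : List (Int × Int)) (x y : Int) :
    y ∈ (pvBuildNbrs E).getD x [] ↔ pvAdj E x y := by
  rw [pvBuildNbrs, pvBuildNbrs_fold]
  simp [PySem.Dict.getD_empty]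

-- the inner for-loop of A's BFS appends the same fresh nodes to seen and to the queue
theorem pvInner_spec (N : List Int) :
    ∀ (S : PySem.Set Int) (Q : List Int), S.Nodup →
    ∃ new : List Int,
      N.foldl (fun (sq : PySem.Set Int × List Int) n =>
          if PySem.Set.contains sq.1 n then sq
          else (PySem.Set.add sq.1 n, sq.2 ++ [n])) (S, Q) = (S ++ new, Q ++ new) ∧
      (S ++ new).Nodup ∧
      (∀ y ∈ new, y ∈ N ∧ y ∉ S) ∧
      (∀ y ∈ N, y ∈ S ++ new) := by
  induction N with
  | nil => intro S Q hS; exact ⟨[], by simp, by simpa using hS, by simp, by simp⟩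
  | cons n N ih =>
    intro S Q hS
    rw [List.foldl_cons]
    by_cases hn : n ∈ S
    · rw [if_pos (by simpa [PySem.Set.contains_iff] using hn)]
      obtain ⟨new, heq, hnd, hnew, hcov⟩ := ih S Q hS
      exact ⟨new, heq, hnd, fun y hy => ⟨List.mem_cons_of_mem _ (hnew y hy).1, (hnew y hy).2⟩,
        fun y hy => by rcases List.mem_cons.1 hy with rfl | hy
                       · exact List.mem_append_left _ hn
                       · exact hcov y hy⟩
    · rw [if_neg (by simpa [PySem.Set.contains_iff] using hn), PySem.Set.add_of_not_mem hn]
      have hS' : (S ++ [n]).Nodup := by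
        simp [List.nodup_append, hS]; exact fun a ha h => hn (h ▸ ha)
      obtain ⟨new, heq, hnd, hnew, hcov⟩ := ih (S ++ [n]) (Q ++ [n]) hS'
      refine ⟨n :: new, ?_, ?_, ?_, ?_⟩
      · simpa [List.append_assoc] using heq
      · simpa [List.append_assoc] using hnd
      · intro y hy
        rcases List.mem_cons.1 hy with rfl | hy
        · exact ⟨List.mem_cons_self, hn⟩
        · have := hnew y hy
          exact ⟨List.mem_cons_of_mem _ this.1, fun h => this.2 (List.mem_append_left _ h)⟩
      · intro y hy
        rcases List.mem_cons.1 hy with rfl | hy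
        · simp
        · have := hcov y hy
          simpa [List.append_assoc] using this

-- A's BFS loop: given the loop invariants, it returns the sum of the final seen set,
-- which is exactly the set of nodes reachable from the start node
theorem pvBfs_main (E : List (Int × Int)) (start : Int) :
    ∀ (fuel : Nat) (S : PySem.Set Int) (Q : List Int) (r : Int),
      S.Nodup → Q.Nodup → (∀ x ∈ Q, x ∈ S) → start ∈ S →
      (∀ x ∈ S, x ∉ Q → ∀ y, pvAdj E x y → y ∈ S) →
      r + Q.sum = S.sum →
      (∀ x ∈ S, pvReach E start x) →
      2 * ((1 + 2 * E.length) - S.length) + Q.length + 1 ≤ fuel →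
      ∃ Sf : PySem.Set Int,
        pvBfsLoop (pvBuildNbrs E) fuel S Q r = (Sf.sum, Sf) ∧ Sf.Nodup ∧
        (∀ x, x ∈ Sf ↔ pvReach E start x) := by
  intro fuel
  induction fuel with
  | zero =>
    intro S Q r hS hQ hQS hst hcl hsum hr hfuel
    cases Q with
    | nil =>
      refine ⟨S, ?_, hS, fun x => ⟨hr x, fun hx => ?_⟩⟩
      · have : r = S.sum := by simpa using hsum
        simp [pvBfsLoop, this]
      · induction hx with
        | refl => exact hst
        | tail _ hadj ih2 => exact hcl _ ih2 (by simp) _ hadj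
    | cons n Q0 => simp at hfuel
  | succ fuel ih =>
    intro S Q r hS hQ hQS hst hcl hsum hr hfuel
    cases Q with
    | nil =>
      refine ⟨S, ?_, hS, fun x => ⟨hr x, fun hx => ?_⟩⟩
      · have : r = S.sum := by simpa using hsum
        simp [pvBfsLoop, this]
      · induction hx with
        | refl => exact hst
        | tail _ hadj ih2 => exact hcl _ ih2 (by simp) _ hadj
    | cons node Q0 =>
      obtain ⟨new, heq, hnd', hnew, hcov⟩ :=
        pvInner_spec ((pvBuildNbrs E).getD node []) S Q0 hS
      have hnodeS : node ∈ S := hQS node List.mem_cons_self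
      have hQ0 : Q0.Nodup := (List.nodup_cons.1 hQ).2
      have hnewnd : new.Nodup := (List.nodup_append.1 hnd').2.1
      have hreach' : ∀ x ∈ S ++ new, pvReach E start x := by
        intro x hx
        rcases List.mem_append.1 hx with hx | hx
        · exact hr x hx
        · have hadj : pvAdj E node x := (pvBuildNbrs_mem E node x).1 (hnew x hx).1
          exact Relation.ReflTransGen.tail (hr node hnodeS) hadj
      have hres := ih (S ++ new) (Q0 ++ new) (r + node) hnd'
        (by
          refine List.nodup_append.2 ⟨hQ0, hnewnd, ?_⟩
          intro a ha b hb hab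
          exact (hnew b hb).2 (hab ▸ hQS a (List.mem_cons_of_mem _ ha)))
        (by
          intro x hx
          rcases List.mem_append.1 hx with hx | hx
          · exact List.mem_append_left _ (hQS x (List.mem_cons_of_mem _ hx))
          · exact List.mem_append_right _ hx)
        (List.mem_append_left _ hst)
        (by
          intro x hx hxQ' y hadj
          rcases List.mem_append.1 hx with hx | hx
          · by_cases hxn : x = node
            · subst hxn
              exact hcov y ((pvBuildNbrs_mem E x y).2 hadj)
            · have hxQ : x ∉ node :: Q0 := by
                intro h
                rcases List.mem_cons.1 h with h | h
                · exact hxn h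
                · exact hxQ' (List.mem_append_left _ h)
              exact List.mem_append_left _ (hcl x hx hxQ y hadj)
          · exact absurd (List.mem_append_right _ hx) hxQ')
        (by
          simp only [List.sum_append, List.sum_cons] at hsum ⊢
          linarith)
        hreach'
        (by
          have hlen : (S ++ new).length ≤ (pvUniv E start).length :=
            pvLen_le hnd' (fun x hx => pvReach_mem_univ (hreach' x hx))
          rw [pvUniv_length] at hlen
          simp only [List.length_append, List.length_cons] at hlen hfuel ⊢
          omega)
      obtain ⟨Sf, hSf, hSfnd, hSfmem⟩ := hres
      refine ⟨Sf, ?_, hSfnd, hSfmem⟩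
      rw [pvBfsLoop]
      simp only [heq]
      exact hSf

-- one sweep of B: appends only reachable fresh nodes; an unchanged sweep certifies closedness
theorem pvPass_fold (E0 : List (Int × Int)) (start : Int) :
    ∀ (E : List (Int × Int)), (∀ p ∈ E, p ∈ E0) →
    ∀ (R : PySem.Set Int) (b : Bool), R.Nodup → (∀ x ∈ R, pvReach E0 start x) →
    ∃ new : List Int,
      E.foldl (fun (st : PySem.Set Int × Bool) p =>
        if PySem.Set.contains st.1 p.1 && !PySem.Set.contains st.1 p.2 then
          (PySem.Set.add st.1 p.2, true)
        else if PySem.Set.contains st.1 p.2 && !PySem.Set.contains st.1 p.1 then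
          (PySem.Set.add st.1 p.1, true)
        else st) (R, b) = (R ++ new, b || !new.isEmpty) ∧
      (R ++ new).Nodup ∧
      (∀ y ∈ new, pvReach E0 start y) ∧
      (new = [] → ∀ p ∈ E, (p.1 ∈ R ↔ p.2 ∈ R)) := by
  intro E
  induction E with
  | nil =>
    intro _ R b hR hreach
    exact ⟨[], by simp, by simpa using hR, by simp, by simp⟩
  | cons p E ih =>
    intro hE0 R b hR hreach
    have hpE0 : p ∈ E0 := hE0 p List.mem_cons_self
    have hE0' : ∀ q ∈ E, q ∈ E0 := fun q hq => hE0 q (List.mem_cons_of_mem _ hq)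
    rw [List.foldl_cons]
    by_cases h1 : p.1 ∈ R ∧ p.2 ∉ R
    · rw [if_pos (by simp [h1.1, h1.2])]
      rw [PySem.Set.add_of_not_mem h1.2]
      have hR' : (R ++ [p.2]).Nodup := by
        refine List.nodup_append.2 ⟨hR, List.nodup_singleton _, ?_⟩
        intro a ha c hc hac
        rw [List.mem_singleton.1 hc] at hac
        exact h1.2 (hac ▸ ha)
      have hreach' : ∀ x ∈ R ++ [p.2], pvReach E0 start x := by
        intro x hx
        rcases List.mem_append.1 hx with hx | hx
        · exact hreach x hx
        · rw [List.mem_singleton.1 hx]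
          exact Relation.ReflTransGen.tail (hreach p.1 h1.1) (Or.inl (by simpa using hpE0))
      obtain ⟨new', heq, hnd, hrch, _⟩ := ih hE0' (R ++ [p.2]) true hR' hreach'
      refine ⟨p.2 :: new', ?_, by simpa [List.append_assoc] using hnd, ?_, by simp⟩
      · rw [heq]; simp [List.append_assoc]
      · intro y hy
        rcases List.mem_cons.1 hy with rfl | hy
        · exact hreach' p.2 (List.mem_append_right _ List.mem_cons_self)
        · exact hrch y hy
    · rw [if_neg (by simp only [Bool.and_eq_true, Bool.not_eq_eq_eq_not, Bool.not_true,
          PySem.Set.contains_iff]; intro h; exact h1 ⟨h.1, by simpa [PySem.Set.contains_iff] using h.2⟩)]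
      by_cases h2 : p.2 ∈ R ∧ p.1 ∉ R
      · rw [if_pos (by simp [h2.1, h2.2])]
        rw [PySem.Set.add_of_not_mem h2.2]
        have hR' : (R ++ [p.1]).Nodup := by
          refine List.nodup_append.2 ⟨hR, List.nodup_singleton _, ?_⟩
          intro a ha c hc hac
          rw [List.mem_singleton.1 hc] at hac
          exact h2.2 (hac ▸ ha)
        have hreach' : ∀ x ∈ R ++ [p.1], pvReach E0 start x := by
          intro x hx
          rcases List.mem_append.1 hx with hx | hx
          · exact hreach x hx
          · rw [List.mem_singleton.1 hx]
            exact Relation.ReflTransGen.tail (hreach p.2 h2.1) (Or.inr (by simpa using hpE0))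
        obtain ⟨new', heq, hnd, hrch, _⟩ := ih hE0' (R ++ [p.1]) true hR' hreach'
        refine ⟨p.1 :: new', ?_, by simpa [List.append_assoc] using hnd, ?_, by simp⟩
        · rw [heq]; simp [List.append_assoc]
        · intro y hy
          rcases List.mem_cons.1 hy with rfl | hy
          · exact hreach' p.1 (List.mem_append_right _ List.mem_cons_self)
          · exact hrch y hy
      · rw [if_neg (by simp only [Bool.and_eq_true, Bool.not_eq_eq_eq_not, Bool.not_true,
            PySem.Set.contains_iff]; intro h; exact h2 ⟨h.1, by simpa [PySem.Set.contains_iff] using h.2⟩)]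
        obtain ⟨new', heq, hnd, hrch, hcl⟩ := ih hE0' R b hR hreach
        refine ⟨new', heq, hnd, hrch, ?_⟩
        intro hnil q hq
        rcases List.mem_cons.1 hq with rfl | hq
        · constructor
          · intro ha; by_contra hb; exact h1 ⟨ha, hb⟩
          · intro hb; by_contra ha; exact h2 ⟨hb, ha⟩
        · exact hcl hnil q hq

-- B's saturation loop reaches the fixed point: exactly the reachable nodes
theorem pvSat_main (E : List (Int × Int)) (start : Int) :
    ∀ (fuel : Nat) (R : PySem.Set Int), R.Nodup → start ∈ R →
      (∀ x ∈ R, pvReach E start x) →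
      (1 + 2 * E.length) - R.length + 1 ≤ fuel →
      (pvSatLoop E fuel R).Nodup ∧
      (∀ x, x ∈ pvSatLoop E fuel R ↔ pvReach E start x) := by
  intro fuel
  induction fuel with
  | zero => intro R _ _ _ hfuel; omega
  | succ fuel ih =>
    intro R hR hst hreach hfuel
    obtain ⟨new, heq, hnd, hrch, hcl⟩ :=
      pvPass_fold E start E (fun _ h => h) R false hR hreach
    have hpass : pvPass E R = (R ++ new, !new.isEmpty) := by
      rw [pvPass, heq]; simp
    cases new with
    | nil =>
      have : pvSatLoop E (fuel+1) R = R := by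
        rw [pvSatLoop, hpass]; simp
      rw [this]
      refine ⟨hR, fun x => ⟨hreach x, fun hx => ?_⟩⟩
      induction hx with
      | refl => exact hst
      | tail _ hadj ih2 =>
        rcases hadj with hadj | hadj
        · exact (hcl rfl _ hadj).1 ih2
        · exact (hcl rfl _ hadj).2 ih2
    | cons m new' =>
      have hstep : pvSatLoop E (fuel+1) R = pvSatLoop E fuel (R ++ m :: new') := by
        rw [pvSatLoop, hpass]; simp
      rw [hstep]
      have hreach' : ∀ x ∈ R ++ m :: new', pvReach E start x := by
        intro x hx
        rcases List.mem_append.1 hx with hx | hx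
        · exact hreach x hx
        · exact hrch x hx
      refine ih (R ++ m :: new') hnd (List.mem_append_left _ hst) hreach' ?_
      have hlen : (R ++ m :: new').length ≤ (pvUniv E start).length :=
        pvLen_le hnd (fun x hx => pvReach_mem_univ (hreach' x hx))
      rw [pvUniv_length] at hlen
      simp only [List.length_append, List.length_cons] at hlen ⊢
      omega

-- ===== VERDICT (by name: the statement is the Claim_ definition above) =====
theorem sumNodes_spec : Claim_equal_sumNodes := by
  intro vl E st _
  unfold Spec_sumNodes sumNodes sumNodes_alt
  by_cases hmem : st ∈ vl
  · have hg1 : (PySem.Set.ofList vl).contains st = true := by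
      simp [PySem.Set.mem_ofList, hmem]
    have hg2 : vl.contains st = true := by simpa using hmem
    rw [if_pos hg1, if_pos hg2]
    have hinit : PySem.Set.add PySem.Set.empty st = [st] := rfl
    rw [hinit]
    obtain ⟨Sf, hA, hAnd, hAmem⟩ := pvBfs_main E st (4 * E.length + 2) [st] [st] 0
      (List.nodup_singleton st) (List.nodup_singleton st) (fun x hx => hx)
      List.mem_cons_self
      (fun x hx hxQ _ _ => absurd hx hxQ)
      (by simp)
      (fun x hx => by rw [List.mem_singleton.1 hx]; exact Relation.ReflTransGen.refl)
      (by simp only [List.length_cons, List.length_nil]; omega)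
    obtain ⟨hBnd, hBmem⟩ := pvSat_main E st (2 * E.length + 2) [st]
      (List.nodup_singleton st) List.mem_cons_self
      (fun x hx => by rw [List.mem_singleton.1 hx]; exact Relation.ReflTransGen.refl)
      (by simp only [List.length_cons, List.length_nil]; omega)
    rw [hA]
    exact List.Perm.sum_eq ((List.perm_ext_iff_of_nodup hAnd hBnd).2
      (fun a => (hAmem a).trans (hBmem a).symm))
  · have hg1 : ¬ (PySem.Set.ofList vl).contains st = true := by
      simp [PySem.Set.mem_ofList, hmem]
    have hg2 : ¬ vl.contains st = true := by simpa using hmem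
    rw [if_neg hg1, if_neg hg2]
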